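-- pv_equiv track=rewrite | github.com/sanskar001/Python-Programming-Exercises | pair_inside_sequence.py | number_arrange
-- ===== SOURCE A (Python) =====
-- def number_arrange(seq,number):
--     first = []
--     second = []
--     for n in seq:
--         if n <= number:
--             first.append(n)
--         else:
--             second.append(n)
--
--     return first + second
-- ===== SOURCE B (Python) =====
-- def number_arrange(seq, number):
--     return sorted(seq, key=lambda n: n > number)
-- ===== Notes on version B (the rewrite author's own statement) =====
-- stated objective: idiomatic
-- what changed: Replaces the explicit two-list partition loop and concatenation with a single stable sort keyed on the boolean predicate n > number.
import Mathlib
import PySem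

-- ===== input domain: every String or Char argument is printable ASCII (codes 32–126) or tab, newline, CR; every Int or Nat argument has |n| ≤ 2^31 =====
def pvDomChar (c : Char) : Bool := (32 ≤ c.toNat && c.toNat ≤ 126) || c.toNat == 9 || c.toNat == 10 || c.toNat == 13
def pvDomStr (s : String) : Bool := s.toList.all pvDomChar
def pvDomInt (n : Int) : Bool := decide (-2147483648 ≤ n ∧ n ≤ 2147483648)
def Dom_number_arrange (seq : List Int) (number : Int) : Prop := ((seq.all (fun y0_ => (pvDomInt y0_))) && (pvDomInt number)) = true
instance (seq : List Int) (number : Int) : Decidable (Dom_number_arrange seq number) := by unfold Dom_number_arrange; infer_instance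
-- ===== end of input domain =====

-- ===== PORT A =====
-- B replaces A's two-accumulator partition loop with one stable sort keyed on (n > number).
def number_arrange (seq : List Int) (number : Int) : List Int :=
  let p := seq.foldl
    (fun (acc : List Int × List Int) n =>
      if n ≤ number then (acc.1 ++ [n], acc.2) else (acc.1, acc.2 ++ [n]))
    ([], [])
  p.1 ++ p.2

-- ===== PORT B =====
def number_arrange_alt (seq : List Int) (number : Int) : List Int :=
  PySem.List.sorted seq (fun n => decide (number < n)) false

-- ===== PRECONDITION & SPEC =====
def Spec_number_arrange (seq : List Int) (number : Int) (out : List Int) : Prop := out = number_arrange_alt seq number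
instance (seq : List Int) (number : Int) (out : List Int) : Decidable (Spec_number_arrange seq number out) := by unfold Spec_number_arrange; infer_instance

-- ===== CLAIM (what is proved, stated in full; the proofs are below) =====
def Claim_equal_number_arrange : Prop := ∀ (seq : List Int) (number : Int), Dom_number_arrange seq number → Spec_number_arrange seq number (number_arrange seq number)

-- ===== LEMMAS AND PROOFS =====
-- insert a key-false element: it passes all the key-false prefix and lands before the key-true suffix
theorem insertBy_mid {α : Type} (before : α → α → Bool) (x : α) (F T : List α)
    (hF : ∀ y ∈ F, before x y = false) (hT : ∀ y ∈ T, before x y = true) :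
    PySem.List.insertBy before x (F ++ T) = F ++ x :: T := by
  induction F with
  | nil =>
    cases T with
    | nil => simp [PySem.List.insertBy]
    | cons t ts => simp [PySem.List.insertBy, hT t (by simp)]
  | cons f fs ih =>
    have hf := hF f (by simp)
    simp only [List.cons_append, PySem.List.insertBy, hf]
    simp only [Bool.false_eq_true, if_false, List.cons.injEq, true_and]
    exact ih (fun y hy => hF y (by simp [hy]))

-- the loop invariant: insertion-sorting xs into a partitioned accumulator F ++ T
-- is A's partition fold started at (F, T)
theorem partition_invariant (number : Int) (xs F T : List Int)
    (hF : ∀ y ∈ F, ¬ number < y) (hT : ∀ y ∈ T, number < y) :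
    xs.foldl (fun acc x =>
        PySem.List.insertBy
          (fun a b => decide ((decide (number < a) : Bool) < (decide (number < b) : Bool))) x acc)
      (F ++ T)
    = (xs.foldl
        (fun (acc : List Int × List Int) n =>
          if n ≤ number then (acc.1 ++ [n], acc.2) else (acc.1, acc.2 ++ [n]))
        (F, T)).1
      ++ (xs.foldl
        (fun (acc : List Int × List Int) n =>
          if n ≤ number then (acc.1 ++ [n], acc.2) else (acc.1, acc.2 ++ [n]))
        (F, T)).2 := by
  induction xs generalizing F T with
  | nil => simp
  | cons x xs ih =>
    by_cases hx : x ≤ number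
    · have hstep : PySem.List.insertBy
          (fun a b => decide ((decide (number < a) : Bool) < (decide (number < b) : Bool))) x (F ++ T)
          = (F ++ [x]) ++ T := by
        rw [insertBy_mid _ _ F T
          (fun y hy => by simp [hF y hy, not_lt.mpr hx])
          (fun y hy => by simp [hT y hy, not_lt.mpr hx])]
        simp
      simp only [List.foldl_cons, hstep, if_pos hx]
      exact ih (F ++ [x]) T
        (fun y hy => by
          rcases List.mem_append.mp hy with h | h
          · exact hF y h
          · simp at h; omega)
        hT
    · have hstep : PySem.List.insertBy
          (fun a b => decide ((decide (number < a) : Bool) < (decide (number < b) : Bool))) x (F ++ T)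
          = F ++ (T ++ [x]) := by
        rw [PySem.List.insertBy_of_forall_not_before _ _ _
          (fun y hy => by
            have : number < x := by omega
            simp [this])]
        simp
      simp only [List.foldl_cons, hstep, if_neg hx]
      exact ih F (T ++ [x]) hF
        (fun y hy => by
          rcases List.mem_append.mp hy with h | h
          · exact hT y h
          · simp at h; omega)

-- ===== VERDICT (by name: the statement is the Claim_ definition above) =====
theorem number_arrange_spec : Claim_equal_number_arrange := by
  intro seq number _
  unfold Spec_number_arrange number_arrange number_arrange_alt
  rw [PySem.List.sorted_eq_foldl_insertBy]
  have := partition_invariant number seq [] [] (by simp) (by simp)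
  simpa using this.symm
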